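-- pv_equiv track=rewrite | github.com/jkenda/slj-Legacy- | src/compiler.py | predprocesiran
-- ===== SOURCE A (Python) =====
-- def predprocesiran(izraz: str) -> str:
-- 	# odstrani presledke
-- 	predproc_str = ""
-- 	med_navednicami = False
-- 	for char in izraz:
-- 		if char == '"':
-- 			med_navednicami = not med_navednicami
-- 		if med_navednicami or not char.isspace():
-- 			predproc_str += char
--
-- 	return predproc_str
-- ===== SOURCE B (Python) =====
-- def predprocesiran(izraz: str) -> str:
-- 	# split on quotes: even-indexed segments are outside quotes (strip whitespace),
-- 	# odd-indexed segments are inside quotes (keep verbatim); rejoin with '"'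
-- 	parts = izraz.split('"')
-- 	return '"'.join(
-- 		''.join(c for c in p if not c.isspace()) if i % 2 == 0 else p
-- 		for i, p in enumerate(parts))
-- ===== Notes on version B (the rewrite author's own statement) =====
-- stated objective: alternative
-- what changed: Replaces the character-by-character toggle loop with a split-on-quote decomposition: segments at even split indices (outside quotes) are whitespace-filtered, odd ones kept verbatim, then all segments are rejoined with the quote character.
import Mathlib
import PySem

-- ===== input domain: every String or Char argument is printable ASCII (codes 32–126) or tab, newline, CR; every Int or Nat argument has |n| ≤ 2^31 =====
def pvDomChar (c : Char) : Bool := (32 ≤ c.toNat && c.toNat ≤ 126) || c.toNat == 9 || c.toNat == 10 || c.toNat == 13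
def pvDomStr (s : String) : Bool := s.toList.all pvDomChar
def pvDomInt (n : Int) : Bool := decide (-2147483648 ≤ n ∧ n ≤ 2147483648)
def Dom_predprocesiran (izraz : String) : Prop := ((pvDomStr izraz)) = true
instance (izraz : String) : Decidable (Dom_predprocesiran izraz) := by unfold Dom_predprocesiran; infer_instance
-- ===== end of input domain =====

-- B replaces A's toggle-state loop by split-on-quote / filter even segments / rejoin ('alternative').

-- ===== PORT A =====
def predprocesiran (izraz : String) : String :=
  let r := izraz.toList.foldl
    (fun (st : List Char × Bool) char =>
      let med := if char = '"' then !st.2 else st.2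
      if med || !PySem.Chars.isspace char then (st.1 ++ [char], med) else (st.1, med))
    ([], false)
  String.ofList r.1

-- ===== PORT B =====
def predprocesiran_alt (izraz : String) : String :=
  let parts := PySem.Chars.splitOn izraz.toList "\"".toList
  String.ofList (PySem.Chars.join "\"".toList
    ((PySem.List.enumerate parts).map
      (fun ip => if ip.1 % 2 == 0 then ip.2.filter (fun c => !PySem.Chars.isspace c) else ip.2)))

-- ===== PRECONDITION & SPEC =====
def Spec_predprocesiran (izraz : String) (out : String) : Prop := out = predprocesiran_alt izraz
instance (izraz : String) (out : String) : Decidable (Spec_predprocesiran izraz out) := by unfold Spec_predprocesiran; infer_instance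

-- ===== CLAIM (what is proved, stated in full; the proofs are below) =====
def Claim_equal_predprocesiran : Prop := ∀ (izraz : String), Dom_predprocesiran izraz → Spec_predprocesiran izraz (predprocesiran izraz)

-- ===== LEMMAS AND PROOFS =====

-- A's loop body as a structural recursion over the remaining characters
def pvFA : List Char → Bool → List Char
  | [], _ => []
  | c :: rest, b =>
    let b' := if c = '"' then !b else b
    (if b' || !PySem.Chars.isspace c then [c] else []) ++ pvFA rest b'

theorem pvFoldA (s : List Char) (acc : List Char) (b : Bool) :
    (s.foldl
      (fun (st : List Char × Bool) char =>
        let med := if char = '"' then !st.2 else st.2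
        if med || !PySem.Chars.isspace char then (st.1 ++ [char], med) else (st.1, med))
      (acc, b)).1 = acc ++ pvFA s b := by
  induction s generalizing acc b with
  | nil => simp [pvFA]
  | cons c rest ih =>
    simp only [List.foldl_cons, pvFA]
    by_cases h : ((if c = '"' then !b else b) || !PySem.Chars.isspace c) = true
    · rw [if_pos h, ih]
      simp [h]
    · rw [if_neg h, ih]
      simp only [Bool.not_eq_true] at h
      simp [h]

-- prepend to the head of a list of segments
def pvConsHead (p : List Char) : List (List Char) → List (List Char)
  | [] => [p]
  | h :: t => (p ++ h) :: t

-- structural split on '"'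
def pvSplitChar : List Char → List (List Char)
  | [] => [[]]
  | c :: rest => if c = '"' then [] :: pvSplitChar rest else pvConsHead [c] (pvSplitChar rest)

theorem pvSplitChar_ne_nil (s : List Char) : pvSplitChar s ≠ [] := by
  cases s with
  | nil => simp [pvSplitChar]
  | cons c rest =>
    simp only [pvSplitChar]
    split_ifs
    · simp
    · cases h : pvSplitChar rest <;> simp [pvConsHead]

theorem pvGo_eq (fuel : Nat) (l cur : List Char) (acc : List (List Char)) (hf : l.length < fuel) :
    PySem.Chars.splitOn.go ['"'] fuel l cur acc =
      acc.reverse ++ pvConsHead cur.reverse (pvSplitChar l) := by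
  induction fuel generalizing l cur acc with
  | zero => omega
  | succ fuel ih =>
    cases l with
    | nil => rw [PySem.Chars.splitOn.go.eq_def]; simp [pvSplitChar, pvConsHead]
    | cons c rest =>
      rw [PySem.Chars.splitOn.go.eq_def]
      by_cases hc : c = '"'
      · subst hc
        have hpre : List.isPrefixOf ['"'] ('"' :: rest) = true := by
          simp [List.isPrefixOf]
        simp only [hpre, if_pos, List.length_singleton, List.drop_succ_cons, List.drop_zero]
        rw [ih rest [] (cur.reverse :: acc) (by simpa using Nat.lt_of_succ_lt_succ hf)]
        simp [pvSplitChar, pvConsHead]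
        cases h : pvSplitChar rest with
        | nil => exact absurd h (pvSplitChar_ne_nil rest)
        | cons p ps => simp
      · have hpre : List.isPrefixOf ['"'] (c :: rest) = false := by
          simp [List.isPrefixOf]
          exact fun h => absurd h.symm hc
        simp only [hpre, Bool.false_eq_true, if_false]
        rw [ih rest (c :: cur) acc (by simpa using Nat.lt_of_succ_lt_succ hf)]
        simp only [pvSplitChar, hc]
        cases h : pvSplitChar rest with
        | nil => exact absurd h (pvSplitChar_ne_nil rest)
        | cons p ps => simp [pvConsHead]

theorem pvSplitOn_eq (s : List Char) :
    PySem.Chars.splitOn s ['"'] = pvSplitChar s := by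
  unfold PySem.Chars.splitOn
  rw [pvGo_eq s.length.succ s [] [] (Nat.lt_succ_self _)]
  cases h : pvSplitChar s with
  | nil => exact absurd h (pvSplitChar_ne_nil s)
  | cons p ps => simp [pvConsHead]

-- the alternating filter/keep join, in B's shape
def pvAltJoin : Bool → List (List Char) → List Char
  | _, [] => []
  | b, p :: ps =>
    (if b then p else p.filter (fun c => !PySem.Chars.isspace c)) ++
      (if ps.isEmpty then [] else ['"']) ++ pvAltJoin (!b) ps

theorem pvAltJoin_consHead (b : Bool) (c : Char) (h : List Char) (t : List (List Char)) :
    pvAltJoin b ((c :: h) :: t) =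
      (if b || !PySem.Chars.isspace c then [c] else []) ++ pvAltJoin b (h :: t) := by
  simp only [pvAltJoin]
  cases b <;> by_cases hs : PySem.Chars.isspace c <;> simp [hs, List.filter]

theorem pvFA_eq_altJoin (s : List Char) (b : Bool) :
    pvFA s b = pvAltJoin b (pvSplitChar s) := by
  induction s generalizing b with
  | nil => simp [pvFA, pvSplitChar, pvAltJoin]
  | cons c rest ih =>
    by_cases hc : c = '"'
    · subst hc
      have hsp : PySem.Chars.isspace '"' = false := by decide
      have hne := pvSplitChar_ne_nil rest
      simp only [pvFA, pvSplitChar, hsp]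
      cases h : pvSplitChar rest with
      | nil => exact absurd h hne
      | cons p ps =>
        simp [ih, h, pvAltJoin]
    · simp only [pvFA, pvSplitChar, if_neg hc]
      cases h : pvSplitChar rest with
      | nil => exact absurd h (pvSplitChar_ne_nil rest)
      | cons p ps =>
        simp only [ih, h, pvConsHead]
        rw [show (([c] ++ p : List Char)) = c :: p from rfl, pvAltJoin_consHead]

theorem pvJoin_enumerate (ps : List (List Char)) (n : Nat) :
    PySem.Chars.join ['"']
      ((PySem.List.enumerate ps (n : Int)).map
        (fun ip => if ip.1 % 2 == 0 then ip.2.filter (fun c => !PySem.Chars.isspace c) else ip.2)) =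
      pvAltJoin (decide ((n : Int) % 2 = 1)) ps := by
  induction ps generalizing n with
  | nil => simp [PySem.List.enumerate_nil, PySem.Chars.join, List.intercalate, pvAltJoin]
  | cons p ps ih =>
    rw [PySem.List.enumerate_cons]
    have hpar : ((n : Int) % 2 = 0 ∨ (n : Int) % 2 = 1) := Int.emod_two_eq _
    have hstep : ((n : Int) + 1) = ((n + 1 : Nat) : Int) := by push_cast; ring
    cases ps with
    | nil =>
      rcases hpar with h | h <;>
        simp [PySem.List.enumerate_nil, PySem.Chars.join, pvAltJoin, h, List.intercalate]
    | cons q qs =>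
      have ih' := ih (n + 1)
      simp only [PySem.List.enumerate_cons, List.map_cons] at ih' ⊢
      rw [PySem.Chars.join_cons_cons, hstep, ih']
      rcases hpar with h | h
      · have h1 : ((n : Int) + 1) % 2 = 1 := by omega
        simp [pvAltJoin, h, h1]
      · have h1 : ((n : Int) + 1) % 2 = 0 := by omega
        simp [pvAltJoin, h, h1]

-- ===== VERDICT (by name: the statement is the Claim_ definition above) =====
theorem predprocesiran_spec : Claim_equal_predprocesiran := by
  intro izraz _
  unfold Spec_predprocesiran predprocesiran predprocesiran_alt
  have hq : ("\"".toList) = ['"'] := rfl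
  have hj := pvJoin_enumerate (PySem.Chars.splitOn izraz.toList "\"".toList) 0
  simp only [Nat.cast_zero, Int.zero_emod] at hj
  rw [show (decide ((0:Int) = 1)) = false from rfl] at hj
  simp only [hq] at hj ⊢
  rw [hj, pvFoldA izraz.toList [] false, List.nil_append, pvFA_eq_altJoin, pvSplitOn_eq]
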